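-- pv_equiv track=rewrite | github.com/rjamesy/calleroo | backend_v2/app/twilio_service.py | _extract_question
-- ===== SOURCE A (Python) =====
-- from typing import Any, Dict, List, Optional
--
-- def _extract_question(text: str) -> Optional[str]:
--     """Extract the question portion from a response (text ending with ?).
--
--     Returns the question text or None if no question found.
--     """
--     if "?" not in text:
--         return None
--
--     # Find the last sentence ending with ?
--     sentences = text.replace("!", ".").replace("?", "?.").split(".")
--     for sentence in reversed(sentences):
--         sentence = sentence.strip()
--         if sentence.endswith("?"):
--             return sentence
--     return None
-- ===== SOURCE B (Python) =====
-- from typing import Optional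
--
-- def _extract_question(text: str) -> Optional[str]:
--     """Single forward pass: track the current sentence; on '?' record it, on '.'/'!' reset."""
--     last = None
--     cur = []
--     for ch in text:
--         if ch == '?':
--             cur.append(ch)
--             last = ''.join(cur).strip()
--             cur = []
--         elif ch == '.' or ch == '!':
--             cur = []
--         else:
--             cur.append(ch)
--     return last
-- ===== Notes on version B (the rewrite author's own statement) =====
-- stated objective: alternative
-- what changed: Replaced A's replace/replace/split sentence-list construction plus reversed scan by a single forward character pass that keeps the current sentence buffer and remembers the last question sentence seen.
import Mathlib
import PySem

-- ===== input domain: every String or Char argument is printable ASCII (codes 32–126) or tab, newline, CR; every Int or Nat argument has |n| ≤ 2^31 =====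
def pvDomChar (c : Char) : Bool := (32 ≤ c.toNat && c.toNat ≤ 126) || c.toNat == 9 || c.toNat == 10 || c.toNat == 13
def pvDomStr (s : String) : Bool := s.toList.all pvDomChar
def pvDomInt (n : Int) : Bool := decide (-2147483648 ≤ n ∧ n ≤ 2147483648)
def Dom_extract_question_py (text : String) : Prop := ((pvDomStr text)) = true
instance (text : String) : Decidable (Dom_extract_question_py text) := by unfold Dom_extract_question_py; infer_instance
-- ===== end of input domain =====

-- B replaces A's replace/replace/split sentence-list construction plus reversed scan by a single
-- forward pass over the characters (no intermediate sentence list is built).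

-- ===== PORT A =====
-- the 'for sentence in reversed(sentences): …' loop of A
def extractLoopA : List (List Char) → Option String
  | [] => none
  | s :: rest =>
    let t := PySem.Chars.strip s
    if PySem.Chars.endswith t ['?'] then some (String.ofList t) else extractLoopA rest

def extract_question_py (text : String) : Option String :=
  if PySem.Str.isIn "?" text = false then none
  else
    let sentences :=
      PySem.Chars.splitOn
        (PySem.Chars.replace (PySem.Chars.replace text.toList ['!'] ['.']) ['?'] ['?', '.']) ['.']
    extractLoopA sentences.reverse

-- ===== PORT B =====
-- state = (last question sentence seen so far, chars of the current sentence)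
def extract_question_py_alt (text : String) : Option String :=
  (text.toList.foldl
    (fun (p : Option String × List Char) ch =>
      if ch = '?' then
        (some (PySem.Str.strip (String.ofList (p.2 ++ [ch]))), [])
      else if ch = '.' ∨ ch = '!' then
        (p.1, [])
      else
        (p.1, p.2 ++ [ch]))
    (none, [])).1

-- ===== PRECONDITION & SPEC =====
def Spec_extract_question_py (text : String) (out : Option String) : Prop := out = extract_question_py_alt text
instance (text : String) (out : Option String) : Decidable (Spec_extract_question_py text out) := by unfold Spec_extract_question_py; infer_instance

-- ===== CLAIM (what is proved, stated in full; the proofs are below) =====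
def Claim_equal_extract_question_py : Prop := ∀ (text : String), Dom_extract_question_py text → Spec_extract_question_py text (extract_question_py text)

-- ===== LEMMAS AND PROOFS =====

-- head/tail of the sentence list A builds out of cs, described structurally over cs
def qSeg : List Char → List Char × List (List Char)
  | [] => ([], [])
  | c :: cs =>
    if c = '?' then (['?'], (qSeg cs).1 :: (qSeg cs).2)
    else if c = '.' ∨ c = '!' then ([], (qSeg cs).1 :: (qSeg cs).2)
    else (c :: (qSeg cs).1, (qSeg cs).2)

-- the last question sentence of cur ++ cs, where cur (no '?' in it) is the buffered sentence prefix
def qres : List Char → List Char → Option (List Char)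
  | _, [] => none
  | cur, c :: cs =>
    if c = '?' then
      match qres [] cs with
      | some r => some r
      | none => some (PySem.Chars.strip (cur ++ ['?']))
    else if c = '.' ∨ c = '!' then qres [] cs
    else qres (cur ++ [c]) cs

-- Python split('.') written structurally (pre = chars of the current piece so far)
def mySplit : List Char → List Char → List (List Char)
  | pre, [] => [pre]
  | pre, c :: t => if c = '.' then pre :: mySplit [] t else mySplit (pre ++ [c]) t

theorem replace_single_go (x : Char) (new : List Char) :
    ∀ (l : List Char) (acc : List Char) (fuel : Nat), l.length ≤ fuel →
      PySem.Chars.replace.go [x] new fuel l acc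
        = acc.reverse ++ l.flatMap (fun c => if c = x then new else [c]) := by
  intro l
  induction l with
  | nil => intro acc fuel _; cases fuel <;> simp [PySem.Chars.replace.go]
  | cons c t ih =>
    intro acc fuel hf
    cases fuel with
    | zero => simp at hf
    | succ f =>
      simp only [PySem.Chars.replace.go]
      by_cases hx : c = x
      · subst hx
        simp [List.isPrefixOf, ih _ f (by simpa using hf)]
      · simp [List.isPrefixOf, beq_iff_eq, Ne.symm hx, hx, ih _ f (by simpa using hf)]

theorem replace_single (x : Char) (new : List Char) (s : List Char) :
    PySem.Chars.replace s [x] new = s.flatMap (fun c => if c = x then new else [c]) := by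
  simp [PySem.Chars.replace, replace_single_go x new s [] s.length le_rfl]

theorem splitOn_dot_go :
    ∀ (l cur : List Char) (acc : List (List Char)) (fuel : Nat), l.length ≤ fuel →
      PySem.Chars.splitOn.go ['.'] fuel l cur acc = acc.reverse ++ mySplit cur.reverse l := by
  intro l
  induction l with
  | nil => intro cur acc fuel _; cases fuel <;> simp [PySem.Chars.splitOn.go, mySplit]
  | cons c t ih =>
    intro cur acc fuel hf
    cases fuel with
    | zero => simp at hf
    | succ f =>
      simp only [PySem.Chars.splitOn.go]
      by_cases hx : c = '.'
      · subst hx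
        simp [List.isPrefixOf, ih [] (cur.reverse :: acc) f (by simpa using hf), mySplit]
      · simp [List.isPrefixOf, beq_iff_eq, Ne.symm hx, hx, ih (c :: cur) acc f (by simpa using hf), mySplit]

theorem splitOn_dot (s : List Char) : PySem.Chars.splitOn s ['.'] = mySplit [] s := by
  simpa using splitOn_dot_go s [] [] (s.length + 1) (by omega)

-- the whole replace/replace/split pipeline of A, against the structural description qSeg
theorem pipeline_eq (cs : List Char) : ∀ pre : List Char,
    mySplit pre
      ((cs.flatMap (fun c => if c = '!' then ['.'] else [c])).flatMap
        (fun c => if c = '?' then ['?', '.'] else [c]))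
      = (pre ++ (qSeg cs).1) :: (qSeg cs).2 := by
  induction cs with
  | nil => intro pre; simp [mySplit, qSeg]
  | cons c cs ih =>
    intro pre
    by_cases hq : c = '?'
    · subst hq; simp [mySplit, qSeg, ih]
    · by_cases hd : c = '.' ∨ c = '!'
      · rcases hd with hd | hd <;> subst hd <;> simp [mySplit, qSeg, ih, hq]
      · push Not at hd
        simp [mySplit, qSeg, hq, hd.1, hd.2, ih (pre ++ [c])]

theorem mem_strip {c : Char} {s : List Char} (h : c ∈ PySem.Chars.strip s) : c ∈ s := by
  simp only [PySem.Chars.strip, PySem.Chars.rstrip, PySem.Chars.lstrip, List.mem_reverse] at h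
  have h1 := (List.dropWhile_sublist _).mem h
  rw [List.mem_reverse] at h1
  exact (List.dropWhile_sublist _).mem h1

theorem checkA_none {s : List Char} (h : '?' ∉ s) :
    PySem.Chars.endswith (PySem.Chars.strip s) ['?'] = false := by
  rw [PySem.Chars.endswith]
  by_contra hb
  simp only [Bool.not_eq_false, List.isSuffixOf_iff_suffix] at hb
  exact h (mem_strip (hb.mem (by simp)))

theorem strip_append_q (cur : List Char) :
    PySem.Chars.endswith (PySem.Chars.strip (cur ++ ['?'])) ['?'] = true := by
  simp only [PySem.Chars.strip, PySem.Chars.endswith]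
  -- lstrip (cur ++ ['?']) is a nonempty suffix of cur ++ ['?'], hence ends with '?'
  have hsuf : List.dropWhile PySem.Chars.isspace (cur ++ ['?']) <:+ cur ++ ['?'] :=
    List.dropWhile_suffix _
  have hne : List.dropWhile PySem.Chars.isspace (cur ++ ['?']) ≠ [] := by
    intro hnil
    have := (List.dropWhile_eq_nil_iff).mp hnil '?' (by simp)
    simp [PySem.Chars.isspace] at this
  obtain ⟨u, hu⟩ : ∃ u, List.dropWhile PySem.Chars.isspace (cur ++ ['?']) = u ++ ['?'] := by
    obtain ⟨w, hw⟩ := hsuf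
    rcases List.eq_nil_or_concat (List.dropWhile PySem.Chars.isspace (cur ++ ['?'])) with hnil | ⟨u, a, hua⟩
    · exact absurd hnil hne
    · refine ⟨u, ?_⟩
      rw [hua] at hw ⊢
      have : a = '?' := by
        have := congrArg (fun l => l.getLast?) hw
        simpa using this
      rw [this]
      exact List.concat_eq_append
  rw [PySem.Chars.lstrip, hu, PySem.Chars.rstrip]
  simp [PySem.Chars.isspace]

theorem extractLoopA_append (xs ys : List (List Char)) :
    extractLoopA (xs ++ ys)
      = match extractLoopA xs with
        | some r => some r
        | none => extractLoopA ys := by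
  induction xs with
  | nil => simp [extractLoopA]
  | cons s rest ih =>
    simp only [List.cons_append, extractLoopA]
    split <;> simp [ih]

theorem qres_none : ∀ (cs cur : List Char), '?' ∉ cs → qres cur cs = none := by
  intro cs
  induction cs with
  | nil => intro cur _; rfl
  | cons c cs ih =>
    intro cur h
    have hc : c ≠ '?' := by rintro rfl; exact h (by simp)
    have hcs : '?' ∉ cs := fun hm => h (by simp [hm])
    by_cases hd : c = '.' ∨ c = '!' <;> simp [qres, hc, hd, ih _ hcs]

-- main A-side lemma: the reversed scan over the sentence list is qres
theorem loopA_eq_qres : ∀ (cs cur : List Char), '?' ∉ cur →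
    extractLoopA (((cur ++ (qSeg cs).1) :: (qSeg cs).2).reverse)
      = Option.map String.ofList (qres cur cs) := by
  intro cs
  induction cs with
  | nil =>
    intro cur h
    simp [qSeg, qres, extractLoopA, checkA_none h]
  | cons c cs ih =>
    intro cur h
    have hins := ih [] (by simp)
    simp only [List.nil_append] at hins
    rw [List.reverse_cons, extractLoopA_append] at hins
    by_cases hq : c = '?'
    · subst hq
      simp only [qSeg, qres, List.reverse_cons, extractLoopA_append, reduceIte]
      rw [hins]
      cases hres : qres [] cs with
      | some r => simp
      | none => simp [extractLoopA, strip_append_q cur]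
    · by_cases hd : c = '.' ∨ c = '!'
      · simp only [qSeg, qres, if_neg hq, if_pos hd, List.reverse_cons, extractLoopA_append]
        rw [hins]
        cases hres : qres [] cs with
        | some r => simp
        | none => simp [extractLoopA, List.append_nil, checkA_none h]
      · have h' : '?' ∉ cur ++ [c] := by
          intro hm; rcases List.mem_append.mp hm with hm | hm
          · exact h hm
          · simp at hm; exact hq hm.symm
        have := ih (cur ++ [c]) h'
        simp only [qSeg, qres, if_neg hq, if_neg hd]
        rw [← this]
        simp

-- main B-side lemma: the fold's first component is qres
theorem fold_eq_qres : ∀ (cs : List Char) (last : Option String) (cur : List Char),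
    (cs.foldl
      (fun (p : Option String × List Char) ch =>
        if ch = '?' then
          (some (PySem.Str.strip (String.ofList (p.2 ++ [ch]))), [])
        else if ch = '.' ∨ ch = '!' then (p.1, [])
        else (p.1, p.2 ++ [ch]))
      (last, cur)).1
      = match qres cur cs with
        | some r => some (String.ofList r)
        | none => last := by
  intro cs
  induction cs with
  | nil => intro last cur; rfl
  | cons c cs ih =>
    intro last cur
    by_cases hq : c = '?'
    · subst hq
      simp only [List.foldl_cons, reduceIte, qres]
      rw [ih]
      cases qres [] cs <;> simp [PySem.Str.strip]
    · by_cases hd : c = '.' ∨ c = '!'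
      · simp only [List.foldl_cons, if_neg hq, if_pos hd, qres]
        rw [ih]
      · simp only [List.foldl_cons, if_neg hq, if_neg hd, qres]
        rw [ih]

-- ===== VERDICT (by name: the statement is the Claim_ definition above) =====
theorem extract_question_py_spec : Claim_equal_extract_question_py := by
  intro text _
  show extract_question_py text = extract_question_py_alt text
  have hB := fold_eq_qres text.toList none []
  unfold extract_question_py extract_question_py_alt
  by_cases hg : PySem.Str.isIn "?" text = false
  · have hnot : '?' ∉ text.toList := by
      intro hm
      rw [PySem.Str.isIn] at hg
      have h2 : ¬ (['?'] <:+: text.toList) := (PySem.Chars.isIn_eq_false_iff _ _).mp hg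
      exact h2 ((List.singleton_infix_iff '?' text.toList).mpr hm)
    rw [if_pos hg, hB, qres_none _ _ hnot]
  · rw [if_neg hg]
    simp only [replace_single, splitOn_dot, pipeline_eq, List.nil_append]
    have hA := loopA_eq_qres text.toList [] (by simp)
    simp only [List.nil_append] at hA
    rw [hA, hB]
    cases qres [] text.toList <;> rfl
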